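-- pv_equiv track=rewrite | github.com/kiraskywing/Code_Practice | CodeSignal/subarray-pair-sum-k.py | solution
-- ===== SOURCE A (Python) =====
-- import collections
--
-- def solution(a, m, k):
--     memo = collections.defaultdict(int)
--     pairs = set()
--
--     for num1 in a[:m]:
--         num2 = k - num1
--         if memo[num2] > 0:
--             pairs.add((min(num1, num2), max(num1, num2)))
--         memo[num1] += 1
--
--     res = int(len(pairs) > 0)
--
--     left = 0
--     for right in range(m, len(a)):
--         num1 = a[left]
--         num2 = k - num1
--
--         if memo[num1] > 1:
--             memo[num1] -= 1
--             if num1 == num2 and memo[num1] == 1: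
--                 pairs.remove((min(num1, num2), max(num1, num2)))
--         else:
--             memo[num1] -= 1
--             if memo[num2] > 0:
--                 pairs.remove((min(num1, num2), max(num1, num2)))
--
--         left += 1
--
--         num1 = a[right]
--         num2 = k - num1
--         if memo[num2] > 0:
--             pairs.add((min(num1, num2), max(num1, num2)))
--
--         res += len(pairs) > 0
--         memo[num1] += 1
--
--     return res
-- ===== SOURCE B (Python) =====
-- def _window_has_pair(w, k):
--     seen = set()
--     for x in w:
--         if k - x in seen:
--             return True
--         seen.add(x)
--     return False
--
-- def solution(a, m, k):
--     n = len(a)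
--     count = 0
--     for s in range(max(n - m, 0) + 1):
--         if _window_has_pair(a[s:s+m], k):
--             count += 1
--     return count
-- ===== Notes on version B (the rewrite author's own statement) =====
-- stated objective: simpler
-- what changed: Replaces A's incremental sliding-window maintenance of a count dictionary and a normalized-pairs set with an independent rescan of each window using a fresh 'seen' set (classic two-sum check per window); for m < 0, where A raises IndexError, B simply returns 0.
import Mathlib
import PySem

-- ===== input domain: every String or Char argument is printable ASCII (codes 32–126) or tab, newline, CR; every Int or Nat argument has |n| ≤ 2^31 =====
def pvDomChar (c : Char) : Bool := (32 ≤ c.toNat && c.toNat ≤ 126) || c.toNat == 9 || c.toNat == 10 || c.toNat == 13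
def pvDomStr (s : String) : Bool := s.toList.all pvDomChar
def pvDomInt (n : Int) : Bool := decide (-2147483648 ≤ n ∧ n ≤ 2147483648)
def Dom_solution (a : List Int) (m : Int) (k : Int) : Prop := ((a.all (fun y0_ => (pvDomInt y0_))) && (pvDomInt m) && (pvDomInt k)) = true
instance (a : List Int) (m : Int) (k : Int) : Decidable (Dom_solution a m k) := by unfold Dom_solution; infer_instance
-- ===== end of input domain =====

-- B replaces A's incremental counter+pair-set sliding-window maintenance by an independent
-- two-sum rescan of each window with a fresh 'seen' set (simpler, no speed claim).

-- ===== PORT A =====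
-- first loop body of A: add num1 to the window (pairs check, then memo[num1] += 1)
def stepA1 (k : Int) (st : PySem.Dict Int Int × PySem.Set (Int × Int)) (num1 : Int) :
    PySem.Dict Int Int × PySem.Set (Int × Int) :=
  let memo := st.1
  let num2 := k - num1
  let pairs := if 0 < memo.getD num2 0 then PySem.Set.add st.2 (min num1 num2, max num1 num2) else st.2
  (memo.insert num1 (memo.getD num1 0 + 1), pairs)

-- second loop body of A (state memo, pairs, left, res); Python's pairs.remove is ported as
-- Set.discard: under Pre_ the removed element is always present, so no KeyError is reachable
def stepA2 (a : List Int) (k : Int)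
    (st : PySem.Dict Int Int × PySem.Set (Int × Int) × Int × Int) (right : Int) :
    PySem.Dict Int Int × PySem.Set (Int × Int) × Int × Int :=
  let memo := st.1
  let pairs := st.2.1
  let left := st.2.2.1
  let res := st.2.2.2
  let num1 := PySem.List.pyGetD a left 0
  let num2 := k - num1
  let mp :=
    if 1 < memo.getD num1 0 then
      let memo' := memo.insert num1 (memo.getD num1 0 - 1)
      (memo', if num1 = num2 ∧ memo'.getD num1 0 = 1 then
                PySem.Set.discard pairs (min num1 num2, max num1 num2) else pairs)
    else
      let memo' := memo.insert num1 (memo.getD num1 0 - 1)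
      (memo', if 0 < memo'.getD num2 0 then
                PySem.Set.discard pairs (min num1 num2, max num1 num2) else pairs)
  let left' := left + 1
  let num1' := PySem.List.pyGetD a right 0
  let num2' := k - num1'
  let pairs' := if 0 < mp.1.getD num2' 0 then
                  PySem.Set.add mp.2 (min num1' num2', max num1' num2') else mp.2
  let res' := res + (if 0 < PySem.Set.len pairs' then (1:Int) else 0)
  (mp.1.insert num1' (mp.1.getD num1' 0 + 1), pairs', left', res')

def solution (a : List Int) (m : Int) (k : Int) : Int :=
  let init := (PySem.List.slice a none (some m)).foldl (stepA1 k) (PySem.Dict.empty, PySem.Set.empty)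
  let res0 : Int := if 0 < PySem.Set.len init.2 then 1 else 0
  let fin := (PySem.List.pyRange m (a.length : Int) 1).foldl (stepA2 a k) (init.1, init.2, 0, res0)
  fin.2.2.2

-- ===== PORT B =====
def hasPairLoop (k : Int) : List Int → PySem.Set Int → Bool
  | [], _ => false
  | x :: xs, seen =>
      if PySem.Set.contains seen (k - x) then true else hasPairLoop k xs (PySem.Set.add seen x)

def solution_alt (a : List Int) (m : Int) (k : Int) : Int :=
  let n : Int := a.length
  (PySem.List.pyRange 0 (max (n - m) 0 + 1) 1).foldl
    (fun count s =>
      if hasPairLoop k (PySem.List.slice a (some s) (some (s + m))) PySem.Set.empty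
      then count + 1 else count) 0

-- ===== PRECONDITION & SPEC =====
-- Pre_ excludes only m < 0, where A raises IndexError ('left' runs past the end of a).
def Pre_solution (a : List Int) (m : Int) (k : Int) : Prop := 0 ≤ m
instance (a : List Int) (m : Int) (k : Int) : Decidable (Pre_solution a m k) := by
  unfold Pre_solution; infer_instance

def pvWitness_solution : List Int × Int × Int := ([1, 2, 3], 2, 3)

def Spec_solution (a : List Int) (m : Int) (k : Int) (out : Int) : Prop := out = solution_alt a m k
instance (a : List Int) (m : Int) (k : Int) (out : Int) : Decidable (Spec_solution a m k out) := by
  unfold Spec_solution; infer_instance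

-- ===== CLAIM (what is proved, stated in full; the proofs are below) =====
def Claim_equal_solution : Prop := ∀ (a : List Int) (m : Int) (k : Int),
  Dom_solution a m k → Pre_solution a m k → Spec_solution a m k (solution a m k)

-- ===== LEMMAS AND PROOFS =====
abbrev good (k : Int) (w : List Int) : Prop := ∃ x ∈ w, (k - x) ∈ w.erase x
def ind (k : Int) (w : List Int) : Int := if good k w then 1 else 0

def AInv (k : Int) (w : List Int) (memo : PySem.Dict Int Int) (pairs : PySem.Set (Int × Int)) : Prop :=
  (∀ x : Int, memo.getD x 0 = (w.count x : Int)) ∧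
  (∀ u v : Int, (u, v) ∈ pairs ↔
     u ≤ v ∧ u + v = k ∧ 0 < w.count u ∧ 0 < w.count v ∧ (u = v → 2 ≤ w.count u))

def win (a : List Int) (M s : Nat) : List Int := (a.drop s).take M

lemma good_cons (k x : Int) (xs : List Int) : good k (x :: xs) ↔ (k - x) ∈ xs ∨ good k xs := by
  unfold good
  constructor
  · rintro ⟨y, hy, hm⟩
    by_cases hxy : x = y
    · subst hxy
      simp [List.erase_cons] at hm
      exact Or.inl hm
    · rw [List.erase_cons_tail (by simpa using hxy)] at hm
      rcases List.mem_cons.1 hm with h | h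
      · have : y = k - x := by omega
        subst this
        exact Or.inl (by simpa using List.mem_of_ne_of_mem (Ne.symm hxy) hy)
      · exact Or.inr ⟨y, List.mem_of_ne_of_mem (Ne.symm hxy) hy, h⟩
  · rintro (h | ⟨y, hy, hm⟩)
    · exact ⟨x, List.mem_cons_self, by simpa [List.erase_cons] using h⟩
    · refine ⟨y, List.mem_cons_of_mem _ hy, ?_⟩
      by_cases hxy : x = y
      · subst hxy
        simpa [List.erase_cons] using List.mem_of_mem_erase hm
      · rw [List.erase_cons_tail (by simpa using hxy)]
        exact List.mem_cons_of_mem _ hm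

lemma good_iff_pairs (k : Int) (w : List Int) :
    (∃ u v : Int, u ≤ v ∧ u + v = k ∧ 0 < w.count u ∧ 0 < w.count v ∧ (u = v → 2 ≤ w.count u))
    ↔ good k w := by
  constructor
  · rintro ⟨u, v, huv, hsum, hu, hv, heq⟩
    by_cases h : u = v
    · subst h
      have h2 : 2 ≤ w.count u := heq rfl
      have hmem : u ∈ w := List.count_pos_iff.1 hu
      refine ⟨u, hmem, ?_⟩
      have : (w.erase u).count u = w.count u - 1 := by
        simp [List.count_erase_self]
      have : 0 < (w.erase u).count u := by omega
      have hv' : k - u = u := by omega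
      rw [hv']
      exact List.count_pos_iff.1 this
    · refine ⟨u, List.count_pos_iff.1 hu, ?_⟩
      have hkv : k - u = v := by omega
      rw [hkv]
      have : (w.erase u).count v = w.count v := by
        rw [List.count_erase_of_ne (by omega)]
      exact List.count_pos_iff.1 (by omega)
  · rintro ⟨x, hx, hm⟩
    have hxc : 0 < w.count x := List.count_pos_iff.2 hx
    have hmc : 0 < (w.erase x).count (k - x) := List.count_pos_iff.2 hm
    have h2 : 0 < w.count (k - x) := by
      by_cases h : k - x = x
      · rw [h] at hmc ⊢
        rw [List.count_erase_self] at hmc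
        omega
      · rwa [List.count_erase_of_ne h] at hmc
    have h3 : x = k - x → 2 ≤ w.count x := by
      intro h
      rw [← h, List.count_erase_self] at hmc
      omega
    refine ⟨min x (k - x), max x (k - x), min_le_max, by rw [min_add_max]; omega, ?_, ?_, ?_⟩
    · rcases le_total x (k - x) with h | h
      · rw [min_eq_left h]; omega
      · rw [min_eq_right h]; omega
    · rcases le_total x (k - x) with h | h
      · rw [max_eq_right h]; omega
      · rw [max_eq_left h]; omega
    · intro he
      have hxe : x = k - x := by
        rcases le_total x (k - x) with h | h
        · rw [min_eq_left h, max_eq_right h] at he; omega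
        · rw [min_eq_right h, max_eq_left h] at he; omega
      have := h3 hxe
      rcases le_total x (k - x) with h | h
      · rw [min_eq_left h]; omega
      · rw [min_eq_right h, ← hxe]; omega

lemma hasPairLoop_iff (k : Int) (w : List Int) (seen : PySem.Set Int) :
    hasPairLoop k w seen = true ↔ (∃ y ∈ w, (k - y) ∈ seen) ∨ good k w := by
  induction w generalizing seen with
  | nil => simp [hasPairLoop, good]
  | cons x xs ih =>
    rw [hasPairLoop]
    by_cases hc : (k - x) ∈ seen
    · rw [(PySem.Set.contains_iff _ _).2 hc, if_pos rfl]
      constructor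
      · intro _; exact Or.inl ⟨x, List.mem_cons_self, hc⟩
      · intro _; rfl
    · have : PySem.Set.contains seen (k - x) = false := by
        simp [PySem.Set.contains_eq_listContains]; exact hc
      rw [this]
      simp only [Bool.false_eq_true, if_false, ih, good_cons]
      constructor
      · rintro (⟨y, hy, hm⟩ | h)
        · rcases (PySem.Set.mem_add _ _ _).1 hm with h' | h'
          · exact Or.inl ⟨y, List.mem_cons_of_mem _ hy, h'⟩
          · have : y = k - x := by omega
            exact Or.inr (Or.inl (this ▸ hy))
        · exact Or.inr (Or.inr h)
      · rintro (⟨y, hy, hm⟩ | h | h)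
        · rcases List.mem_cons.1 hy with h' | h'
          · subst h'; exact absurd hm hc
          · exact Or.inl ⟨y, h', (PySem.Set.mem_add _ _ _).2 (Or.inl hm)⟩
        · exact Or.inl ⟨k - x, h, (PySem.Set.mem_add _ _ _).2 (Or.inr (by omega))⟩
        · exact Or.inr h

lemma count_app_self (w : List Int) (x : Int) : (w ++ [x]).count x = w.count x + 1 := by
  simp [List.count_append]

lemma count_app_ne (w : List Int) (x y : Int) (h : y ≠ x) : (w ++ [x]).count y = w.count y := by
  simp [List.count_append, List.count_cons, show ¬ x = y from fun hh => h hh.symm]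

lemma count_app_ge (w : List Int) (x y : Int) : w.count y ≤ (w ++ [x]).count y := by
  simp [List.count_append]

lemma inv_empty (k : Int) : AInv k [] PySem.Dict.empty PySem.Set.empty := by
  constructor
  · intro x; simp [PySem.Dict.getD_empty]
  · intro u v
    simp [PySem.Set.empty]

lemma inv_add (k : Int) (w : List Int) (memo : PySem.Dict Int Int)
    (pairs : PySem.Set (Int × Int)) (x : Int) (h : AInv k w memo pairs) :
    AInv k (w ++ [x]) (memo.insert x (memo.getD x 0 + 1))
      (if 0 < memo.getD (k - x) 0 then PySem.Set.add pairs (min x (k - x), max x (k - x)) else pairs) := by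
  obtain ⟨hc, hp⟩ := h
  constructor
  · intro y
    rw [PySem.Dict.getD_insert]
    by_cases hy : y = x
    · subst hy
      rw [if_pos rfl, hc, count_app_self]
      push_cast; ring
    · rw [if_neg hy, hc, count_app_ne w x y hy]
  · intro u v
    have fwd : (u ≤ v ∧ u + v = k ∧ 0 < w.count u ∧ 0 < w.count v ∧ (u = v → 2 ≤ w.count u)) →
        (u ≤ v ∧ u + v = k ∧ 0 < (w ++ [x]).count u ∧ 0 < (w ++ [x]).count v ∧
          (u = v → 2 ≤ (w ++ [x]).count u)) := by
      rintro ⟨h1, h2, h3, h4, h5⟩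
      have gu := count_app_ge w x u
      have gv := count_app_ge w x v
      exact ⟨h1, h2, by omega, by omega, fun he => by have := h5 he; omega⟩
    split_ifs with hpos
    · rw [hc] at hpos
      have hkx : 0 < w.count (k - x) := by exact_mod_cast hpos
      rw [PySem.Set.mem_add _ _ _, hp u v]
      constructor
      · rintro (hC | heq)
        · exact fwd hC
        · rw [Prod.mk.injEq] at heq
          obtain ⟨hu, hv⟩ := heq
          subst hu hv
          rcases le_total x (k - x) with hle | hle
          · rw [min_eq_left hle, max_eq_right hle]
            refine ⟨hle, by omega, ?_, ?_, ?_⟩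
            · rw [count_app_self]; omega
            · by_cases hkk : k - x = x
              · rw [hkk, count_app_self]; omega
              · rw [count_app_ne w x _ hkk]; omega
            · intro he
              rw [← he] at hkx
              rw [count_app_self]; omega
          · rw [min_eq_right hle, max_eq_left hle]
            refine ⟨hle, by omega, ?_, ?_, ?_⟩
            · by_cases hkk : k - x = x
              · rw [hkk, count_app_self]; omega
              · rw [count_app_ne w x _ hkk]; omega
            · rw [count_app_self]; omega
            · intro he
              have hkk : k - x = x := he
              rw [hkk] at hkx
              rw [hkk, count_app_self]
              omega
      · rintro ⟨h1, h2, h3, h4, h5⟩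
        by_cases hu : u = x
        · subst hu
          have hvv : v = k - u := by omega
          subst hvv
          right
          rw [min_eq_left h1, max_eq_right h1]
        · by_cases hv : v = x
          · subst hv
            have huu : u = k - v := by omega
            subst huu
            right
            rw [min_eq_right h1, max_eq_left h1]
          · left
            rw [count_app_ne w x u hu] at h3 h5
            rw [count_app_ne w x v hv] at h4
            exact ⟨h1, h2, h3, h4, h5⟩
    · rw [hc] at hpos
      have hkx : w.count (k - x) = 0 := by omega
      rw [hp u v]
      constructor
      · exact fwd
      · rintro ⟨h1, h2, h3, h4, h5⟩
        by_cases hu : u = x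
        · exfalso
          subst hu
          have hvv : v = k - u := by omega
          subst hvv
          by_cases hkk : k - u = u
          · rw [hkk, count_app_self] at h4
            have := h5 hkk.symm
            rw [count_app_self] at this
            rw [hkk] at hkx
            omega
          · rw [count_app_ne w u _ hkk] at h4
            omega
        · by_cases hv : v = x
          · exfalso
            subst hv
            have huu : u = k - v := by omega
            subst huu
            by_cases hkk : k - v = v
            · rw [hkk, count_app_self] at h3
              have := h5 hkk
              rw [hkk, count_app_self] at this
              rw [hkk] at hkx
              omega
            · rw [count_app_ne w v _ hkk] at h3
              omega
          · rw [count_app_ne w x u hu] at h3 h5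
            rw [count_app_ne w x v hv] at h4
            exact ⟨h1, h2, h3, h4, h5⟩

lemma count_cons_ge (t : List Int) (x y : Int) : t.count y ≤ (x :: t).count y := by
  simp [List.count_cons]

lemma fwd_cons (k x u v : Int) (t : List Int) :
    (u ≤ v ∧ u + v = k ∧ 0 < t.count u ∧ 0 < t.count v ∧ (u = v → 2 ≤ t.count u)) →
    (u ≤ v ∧ u + v = k ∧ 0 < (x :: t).count u ∧ 0 < (x :: t).count v ∧
      (u = v → 2 ≤ (x :: t).count u)) := by
  rintro ⟨h1, h2, h3, h4, h5⟩
  have gu := count_cons_ge t x u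
  have gv := count_cons_ge t x v
  exact ⟨h1, h2, by omega, by omega, fun he => by have := h5 he; omega⟩

lemma inv_rem (k x : Int) (t : List Int) (memo : PySem.Dict Int Int)
    (pairs : PySem.Set (Int × Int)) (h : AInv k (x :: t) memo pairs) :
    AInv k t (memo.insert x (memo.getD x 0 - 1))
      (if 1 < memo.getD x 0 then
         (if x = k - x ∧ (memo.insert x (memo.getD x 0 - 1)).getD x 0 = 1 then
            PySem.Set.discard pairs (min x (k - x), max x (k - x)) else pairs)
       else
         (if 0 < (memo.insert x (memo.getD x 0 - 1)).getD (k - x) 0 then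
            PySem.Set.discard pairs (min x (k - x), max x (k - x)) else pairs)) := by
  obtain ⟨hc, hp⟩ := h
  have hcs : (x :: t).count x = t.count x + 1 := by simp [List.count_cons]
  have hcn : ∀ y : Int, y ≠ x → (x :: t).count y = t.count y := by
    intro y hy
    simp [List.count_cons, show ¬ y = x from hy, show ¬ x = y from fun hh => hy hh.symm]
  have hmx : (memo.insert x (memo.getD x 0 - 1)).getD x 0 = (t.count x : Int) := by
    rw [PySem.Dict.getD_insert, if_pos rfl, hc, hcs]
    push_cast; ring
  have hmn : ∀ y : Int, y ≠ x → (memo.insert x (memo.getD x 0 - 1)).getD y 0 = (t.count y : Int) := by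
    intro y hy
    rw [PySem.Dict.getD_insert, if_neg hy, hc, hcn y hy]
  refine ⟨?_, ?_⟩
  · intro y
    by_cases hy : y = x
    · subst hy; exact hmx
    · exact hmn y hy
  · intro u v
    rw [hc] at *
    split_ifs with hA hA1 hB1
    · -- t.count x ≥ 1, x = k - x and new count = 1 (i.e. t.count x = 1): pair (x,x) removed
      obtain ⟨hkk, hone⟩ := hA1
      rw [hmx] at hone
      have htx : t.count x = 1 := by exact_mod_cast hone
      rw [← hkk, min_self, max_self]
      rw [PySem.Set.mem_discard _ _ _, hp u v]
      constructor
      · rintro ⟨⟨h1, h2, h3, h4, h5⟩, hne⟩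
        by_cases hu : u = x
        · exfalso
          subst hu
          have : v = u := by omega
          exact hne (by rw [this])
        · by_cases hv : v = x
          · exfalso
            subst hv
            have : u = v := by omega
            exact hne (by rw [this])
          · rw [hcn u hu] at h3 h5
            rw [hcn v hv] at h4
            exact ⟨h1, h2, h3, h4, h5⟩
      · rintro ⟨h1, h2, h3, h4, h5⟩
        refine ⟨fwd_cons k x u v t ⟨h1, h2, h3, h4, h5⟩, ?_⟩
        intro heq
        rw [Prod.mk.injEq] at heq
        obtain ⟨hu, hv⟩ := heq
        subst hu hv
        have := h5 rfl
        omega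
    · -- t.count x ≥ 1, pair survives
      rw [hp u v]
      have hA' : 0 < t.count x := by
        have : (1:Int) < ((x :: t).count x : Int) := hA
        rw [hcs] at this
        omega
      constructor
      · rintro ⟨h1, h2, h3, h4, h5⟩
        by_cases hu : u = x
        · subst hu
          have hvv : v = k - u := by omega
          subst hvv
          by_cases hkk : k - u = u
          · have h2x : 2 ≤ t.count u := by
              by_contra hlt
              push_neg at hlt
              have htx1 : t.count u = 1 := by omega
              exact hA1 ⟨hkk.symm, by rw [hmx, htx1]; norm_num⟩
            refine ⟨h1, by omega, by omega, ?_, fun _ => h2x⟩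
            rw [hkk]; omega
          · refine ⟨h1, by omega, by omega, ?_, fun he => absurd he.symm hkk⟩
            rw [hcn (k - u) hkk] at h4
            exact h4
        · by_cases hv : v = x
          · subst hv
            have huu : u = k - v := by omega
            subst huu
            by_cases hkk : k - v = v
            · have h2x : 2 ≤ t.count v := by
                by_contra hlt
                push_neg at hlt
                have htx1 : t.count v = 1 := by omega
                exact hA1 ⟨hkk.symm, by rw [hmx, htx1]; norm_num⟩
              refine ⟨h1, by omega, ?_, by omega, fun _ => by rw [hkk]; exact h2x⟩
              rw [hkk]; omega
            · refine ⟨h1, by omega, ?_, by omega, fun he => absurd he hkk⟩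
              rw [hcn (k - v) hkk] at h3
              exact h3
          · rw [hcn u hu] at h3 h5
            rw [hcn v hv] at h4
            exact ⟨h1, h2, h3, h4, h5⟩
      · exact fwd_cons k x u v t
    · -- t.count x = 0, companion still present: pair removed
      have htx : t.count x = 0 := by
        have : ¬ (1:Int) < ((x :: t).count x : Int) := hA
        rw [hcs] at this
        omega
      have hkk : k - x ≠ x := by
        intro he
        rw [he, hmx] at hB1
        omega
      rw [hmn (k - x) hkk] at hB1
      rw [PySem.Set.mem_discard _ _ _, hp u v]
      constructor
      · rintro ⟨⟨h1, h2, h3, h4, h5⟩, hne⟩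
        by_cases hu : u = x
        · exfalso
          subst hu
          have hvv : v = k - u := by omega
          subst hvv
          exact hne (by rw [min_eq_left h1, max_eq_right h1])
        · by_cases hv : v = x
          · exfalso
            subst hv
            have huu : u = k - v := by omega
            subst huu
            exact hne (by rw [min_eq_right h1, max_eq_left h1])
          · rw [hcn u hu] at h3 h5
            rw [hcn v hv] at h4
            exact ⟨h1, h2, h3, h4, h5⟩
      · rintro ⟨h1, h2, h3, h4, h5⟩
        refine ⟨fwd_cons k x u v t ⟨h1, h2, h3, h4, h5⟩, ?_⟩
        intro heq
        rw [Prod.mk.injEq] at heq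
        obtain ⟨hu, hv⟩ := heq
        rcases le_total x (k - x) with hle | hle
        · rw [min_eq_left hle] at hu
          subst hu
          omega
        · rw [max_eq_left hle] at hv
          subst hv
          omega
    · -- t.count x = 0, companion absent: pair survives (it was never there)
      have htx : t.count x = 0 := by
        have : ¬ (1:Int) < ((x :: t).count x : Int) := hA
        rw [hcs] at this
        omega
      rw [hp u v]
      constructor
      · rintro ⟨h1, h2, h3, h4, h5⟩
        by_cases hu : u = x
        · exfalso
          subst hu
          have hvv : v = k - u := by omega
          subst hvv
          by_cases hkk : k - u = u
          · have := h5 hkk.symm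
            rw [hcs] at this
            omega
          · rw [hcn (k - u) hkk] at h4
            rw [hmn (k - u) hkk] at hB1
            omega
        · by_cases hv : v = x
          · exfalso
            subst hv
            have huu : u = k - v := by omega
            subst huu
            by_cases hkk : k - v = v
            · have := h5 hkk
              rw [hkk, hcs] at this
              omega
            · rw [hcn (k - v) hkk] at h3
              rw [hmn (k - v) hkk] at hB1
              omega
          · rw [hcn u hu] at h3 h5
            rw [hcn v hv] at h4
            exact ⟨h1, h2, h3, h4, h5⟩
      · exact fwd_cons k x u v t

lemma inv_pairs_pos (k : Int) (w : List Int) (memo : PySem.Dict Int Int)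
    (pairs : PySem.Set (Int × Int)) (h : AInv k w memo pairs) :
    (if 0 < PySem.Set.len pairs then (1:Int) else 0) = ind k w := by
  obtain ⟨_, hp⟩ := h
  unfold ind
  have : (0 < PySem.Set.len pairs) ↔ good k w := by
    simp only [PySem.Set.len]
    rw [Int.natCast_pos, List.length_pos_iff_exists_mem]
    constructor
    · rintro ⟨⟨u, v⟩, hm⟩
      exact (good_iff_pairs k w).1 ⟨u, v, (hp u v).1 hm⟩
    · intro hg
      obtain ⟨u, v, hC⟩ := (good_iff_pairs k w).2 hg
      exact ⟨(u, v), (hp u v).2 hC⟩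
  by_cases hl : 0 < PySem.Set.len pairs
  · rw [if_pos hl, if_pos (this.1 hl)]
  · rw [if_neg hl, if_neg (fun hg => hl (this.2 hg))]

lemma foldA1 (k : Int) : ∀ (l w : List Int) (memo : PySem.Dict Int Int)
    (pairs : PySem.Set (Int × Int)), AInv k w memo pairs →
    AInv k (w ++ l) (l.foldl (stepA1 k) (memo, pairs)).1 (l.foldl (stepA1 k) (memo, pairs)).2 := by
  intro l
  induction l with
  | nil => intro w memo pairs h; simpa using h
  | cons x xs ih =>
    intro w memo pairs h
    have step := inv_add k w memo pairs x h
    have : w ++ x :: xs = (w ++ [x]) ++ xs := by simp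
    rw [this, List.foldl_cons]
    exact ih (w ++ [x]) _ _ step

lemma loopA (a : List Int) (k : Int) (M : Nat) (hM : 1 ≤ M) :
    ∀ (c : Nat), ∀ (j : Nat), j + c = a.length → M ≤ j →
    ∀ (memo : PySem.Dict Int Int) (pairs : PySem.Set (Int × Int)) (res : Int),
    AInv k (win a M (j - M)) memo pairs →
    ((PySem.List.pyRange (j : Int) (a.length : Int) 1).foldl (stepA2 a k)
        (memo, pairs, ((j - M : Nat) : Int), res)).2.2.2
      = res + ((List.range c).map (fun t => ind k (win a M (j - M + 1 + t)))).sum := by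
  obtain ⟨Mm, rfl⟩ : ∃ Mm, M = Mm + 1 := ⟨M - 1, by omega⟩
  intro c
  induction c with
  | zero =>
    intro j hj hMj memo pairs res hInv
    rw [PySem.List.pyRange_one_eq_nil (by omega)]
    simp
  | succ c ih =>
    intro j hj hMj memo pairs res hInv
    have hjlt : j < a.length := by omega
    have hjM : j - (Mm + 1) < a.length := by omega
    have hjM1 : j - (Mm + 1) + 1 + Mm = j := by omega
    -- decompose the window
    have hdrop : a.drop (j - (Mm + 1)) = a[j - (Mm + 1)] :: a.drop (j - (Mm + 1) + 1) :=
      List.drop_eq_getElem_cons hjM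
    have hwin : win a (Mm + 1) (j - (Mm + 1))
        = a[j - (Mm + 1)] :: ((a.drop (j - (Mm + 1) + 1)).take Mm) := by
      unfold win
      rw [hdrop]
      rfl
    set x := a[j - (Mm + 1)]'hjM with hxdef
    set t := (a.drop (j - (Mm + 1) + 1)).take Mm with htdef
    rw [hwin] at hInv
    -- removal invariant
    have hInvR := inv_rem k x t memo pairs hInv
    set memoR := memo.insert x (memo.getD x 0 - 1) with hmemoR
    set pairsR := (if 1 < memo.getD x 0 then
         (if x = k - x ∧ memoR.getD x 0 = 1 then
            PySem.Set.discard pairs (min x (k - x), max x (k - x)) else pairs)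
       else
         (if 0 < memoR.getD (k - x) 0 then
            PySem.Set.discard pairs (min x (k - x), max x (k - x)) else pairs)) with hpairsR
    -- addition invariant
    set y := a[j]'hjlt with hydef
    have hInv2 := inv_add k t memoR pairsR y hInvR
    set pairs2 := (if 0 < memoR.getD (k - y) 0 then
        PySem.Set.add pairsR (min y (k - y), max y (k - y)) else pairsR) with hpairs2
    set memo2 := memoR.insert y (memoR.getD y 0 + 1) with hmemo2
    have htwin : t ++ [y] = win a (Mm + 1) (j - (Mm + 1) + 1) := by
      unfold win
      rw [List.take_succ, htdef]
      congr 1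
      rw [List.getElem?_drop, hjM1]
      simp [hydef, List.getElem?_eq_getElem hjlt]
    rw [htwin] at hInv2
    -- one unfolding of the loop
    rw [PySem.List.pyRange_one_cons (by exact_mod_cast hjlt), List.foldl_cons]
    have hstep : stepA2 a k (memo, pairs, ((j - (Mm + 1) : Nat) : Int), res) (j : Int)
        = (memo2, pairs2, ((j - (Mm + 1) : Nat) : Int) + 1,
           res + (if 0 < PySem.Set.len pairs2 then (1:Int) else 0)) := by
      simp only [stepA2, PySem.List.pyGetD_natCast]
      rw [List.getD_eq_getElem a 0 hjM, List.getD_eq_getElem a 0 hjlt]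
      simp only [hmemo2, hpairs2, hmemoR, hpairsR, hxdef, hydef]
      split_ifs <;> rfl
    rw [hstep]
    have hleft : ((j - (Mm + 1) : Nat) : Int) + 1 = ((j + 1 - (Mm + 1) : Nat) : Int) := by omega
    have hj1 : ((j : Int) + 1) = ((j + 1 : Nat) : Int) := by push_cast; ring
    rw [inv_pairs_pos k _ _ _ hInv2, hleft, hj1,
        ih (j + 1) (by omega) (by omega) memo2 pairs2 _ (by
          rw [show j + 1 - (Mm + 1) = j - (Mm + 1) + 1 by omega]
          exact hInv2)]
    rw [List.range_succ_eq_map, List.map_cons, List.sum_cons, List.map_map]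
    rw [List.map_congr_left (l := List.range c)
        (f := fun t => ind k (win a (Mm + 1) (j + 1 - (Mm + 1) + 1 + t)))
        (g := (fun t => ind k (win a (Mm + 1) (j - (Mm + 1) + 1 + t))) ∘ Nat.succ)
        (by
          intro t ht
          simp only [Function.comp_apply]
          congr 2
          omega)]
    ring

lemma loopA0 (a : List Int) (k : Int) :
    ∀ (c : Nat), ∀ (j : Nat), j + c = a.length →
    ∀ (memo : PySem.Dict Int Int) (res : Int), (∀ x : Int, memo.getD x 0 = 0) →
    ((PySem.List.pyRange (j : Int) (a.length : Int) 1).foldl (stepA2 a k)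
        (memo, (PySem.Set.empty : PySem.Set (Int × Int)), (j : Int), res)).2.2.2 = res := by
  intro c
  induction c with
  | zero =>
    intro j hj memo res h0
    rw [PySem.List.pyRange_one_eq_nil (by omega)]
    rfl
  | succ c ih =>
    intro j hj memo res h0
    rw [PySem.List.pyRange_one_cons (by exact_mod_cast (by omega : j < a.length)), List.foldl_cons]
    set x := PySem.List.pyGetD a (j : Int) 0 with hx
    have h1 : ¬ 1 < memo.getD x 0 := by rw [h0 x]; omega
    have h2 : ¬ 0 < (memo.insert x (memo.getD x 0 - 1)).getD (k - x) 0 := by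
      rw [PySem.Dict.getD_insert]
      split_ifs with he
      · rw [h0 x]; omega
      · rw [h0]; omega
    have hstep : stepA2 a k (memo, (PySem.Set.empty : PySem.Set (Int × Int)), (j : Int), res) (j : Int)
        = ((memo.insert x (memo.getD x 0 - 1)).insert x
             ((memo.insert x (memo.getD x 0 - 1)).getD x 0 + 1),
           (PySem.Set.empty : PySem.Set (Int × Int)), (j : Int) + 1, res) := by
      simp only [stepA2, ← hx]
      rw [if_neg h1]
      simp only [if_neg h2]
      simp [PySem.Set.len, PySem.Set.empty]
    rw [hstep]
    have h0' : ∀ y : Int, ((memo.insert x (memo.getD x 0 - 1)).insert x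
        ((memo.insert x (memo.getD x 0 - 1)).getD x 0 + 1)).getD y 0 = 0 := by
      intro y
      rw [PySem.Dict.getD_insert]
      split_ifs with he
      · rw [PySem.Dict.getD_insert, if_pos rfl, h0 x]; ring
      · rw [PySem.Dict.getD_insert, if_neg he, h0 y]
    have hj1 : ((j : Int) + 1) = ((j + 1 : Nat) : Int) := by push_cast; ring
    rw [hj1, ih (j + 1) (by omega) _ res h0']

lemma hasPairLoop_win (a : List Int) (m k : Int) (hm : 0 ≤ m) (t : Nat) :
    hasPairLoop k (PySem.List.slice a (some ((t : Nat) : Int)) (some (((t : Nat) : Int) + m))) PySem.Set.empty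
      = decide (good k (win a m.toNat t)) := by
  have hmM : m = ((m.toNat : Nat) : Int) := (Int.toNat_of_nonneg hm).symm
  have hs : PySem.List.slice a (some ((t : Nat) : Int)) (some (((t : Nat) : Int) + m)) = win a m.toNat t := by
    conv_lhs => rw [hmM]
    rw [PySem.List.slice_natCast_add]
    rfl
  rw [hs]
  by_cases hg : good k (win a m.toNat t)
  · simp only [hg, decide_true]
    exact (hasPairLoop_iff k _ _).2 (Or.inr hg)
  · simp only [hg, decide_false]
    rcases Bool.eq_false_or_eq_true (hasPairLoop k (win a m.toNat t) PySem.Set.empty) with hb | hb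
    swap
    · exact hb
    · exfalso
      rcases (hasPairLoop_iff k _ _).1 hb with ⟨y, _, hy⟩ | h
      · simp [PySem.Set.empty] at hy
      · exact hg h

lemma alt_eq_sum (a : List Int) (m : Int) (k : Int) (hm : 0 ≤ m) :
    solution_alt a m k
      = ((List.range ((max ((a.length : Int) - m) 0 + 1).toNat)).map
          (fun t => ind k (win a m.toNat t))).sum := by
  unfold solution_alt
  rw [PySem.List.foldl_if_add_one, PySem.List.pyRange_one, List.countP_map, zero_add]
  rw [show ((max ((a.length : Int) - m) 0 + 1) - 0) = (max ((a.length : Int) - m) 0 + 1) by ring]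
  rw [← PySem.List.sum_map_ite_one_zero]
  refine congrArg List.sum (List.map_congr_left ?_)
  intro t _
  simp only [Function.comp_apply, zero_add]
  rw [hasPairLoop_win a m k hm t]
  by_cases hg : good k (win a m.toNat t)
  · simp [ind, hg]
  · simp [ind, hg]

theorem final_eq (a : List Int) (m : Int) (k : Int) (hm : 0 ≤ m) :
    solution a m k = solution_alt a m k := by
  rw [alt_eq_sum a m k hm]
  obtain ⟨M, rfl⟩ : ∃ M : Nat, m = (M : Int) := ⟨m.toNat, (Int.toNat_of_nonneg hm).symm⟩
  simp only [Int.toNat_natCast]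
  simp only [solution]
  rw [PySem.List.slice_to_natCast a M]
  set n := a.length with hndef
  have hphase1 : AInv k (a.take M)
      ((a.take M).foldl (stepA1 k) (PySem.Dict.empty, PySem.Set.empty)).1
      ((a.take M).foldl (stepA1 k) (PySem.Dict.empty, PySem.Set.empty)).2 := by
    simpa using foldA1 k (a.take M) [] PySem.Dict.empty PySem.Set.empty (inv_empty k)
  by_cases hM0 : M = 0
  · -- m = 0: every window is empty, both sides are 0
    subst hM0
    simp only [List.take_zero] at hphase1 ⊢
    have h0 : ∀ x : Int, (PySem.Dict.empty : PySem.Dict Int Int).getD x 0 = 0 := by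
      intro x; simp [PySem.Dict.getD_empty]
    have hl0 := loopA0 a k n 0 (by omega) PySem.Dict.empty 0 h0
    refine Eq.trans (b := (0:Int)) ?_ ?_
    · exact hl0
    · symm
      apply List.sum_eq_zero
      intro x hx
      simp only [List.mem_map] at hx
      obtain ⟨t, _, hxt⟩ := hx
      rw [← hxt, show win a 0 t = [] by simp [win]]
      simp [ind, good]
  · have hM1 : 1 ≤ M := by omega
    by_cases hMn : M ≤ n
    · -- main case
      have hwin0 : win a M 0 = a.take M := by simp [win]
      have hloop := loopA a k M hM1 (n - M) M (by omega) (le_refl M)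
          ((a.take M).foldl (stepA1 k) (PySem.Dict.empty, PySem.Set.empty)).1
          ((a.take M).foldl (stepA1 k) (PySem.Dict.empty, PySem.Set.empty)).2
          (if 0 < PySem.Set.len ((a.take M).foldl (stepA1 k) (PySem.Dict.empty, PySem.Set.empty)).2 then (1:Int) else 0)
          (by rw [show M - M = 0 by omega, hwin0]; exact hphase1)
      rw [show ((M - M : Nat) : Int) = (0 : Int) by omega] at hloop
      rw [hndef] at hloop ⊢
      rw [hloop]
      rw [inv_pairs_pos k (a.take M) _ _ hphase1]
      rw [show (max ((a.length : Int) - (M : Int)) 0 + 1).toNat = a.length - M + 1 by omega]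
      rw [List.range_succ_eq_map, List.map_cons, List.sum_cons, List.map_map]
      rw [hwin0]
      rw [List.map_congr_left (l := List.range (a.length - M))
          (f := fun t => ind k (win a M (M - M + 1 + t)))
          (g := (fun t => ind k (win a M t)) ∘ Nat.succ)
          (by
            intro t ht
            simp only [Function.comp_apply]
            congr 2
            omega)]
    · -- m exceeds the list length: a single window, the whole list
      have htake : a.take M = a := List.take_of_length_le (by omega)
      rw [PySem.List.pyRange_one_eq_nil (by exact_mod_cast (by omega : (n : Int) ≤ (M : Int)))]
      rw [List.foldl_nil]
      rw [inv_pairs_pos k (a.take M) _ _ hphase1]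
      rw [show (max ((n : Int) - (M : Int)) 0 + 1).toNat = 1 by omega]
      simp only [List.range_one, List.map_cons, List.map_nil, List.sum_cons, List.sum_nil]
      rw [show win a M 0 = a.take M by simp [win], htake]
      ring

-- ===== VERDICT (by name: the statement is the Claim_ definition above) =====
theorem solution_spec : Claim_equal_solution := by
  intro a m k _ hp
  exact final_eq a m k hp
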